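-- pv_equiv track=rewrite | github.com/NeueDarshan/simple_ConTeXt | scripts/html_css.py | protect_space
-- ===== SOURCE A (Python) =====
-- def protect_space(text: str) -> str:
--     result = ""
--     in_tag = False
--     for c in text:
--         if c == "<":
--             result += c
--             in_tag = True
--         elif c == ">":
--             result += c
--             in_tag = False
--         elif in_tag:
--             result += c
--         else:
--             result += c.replace(" ", "&nbsp;")
--     return result.replace("\n", "<br>")
-- ===== SOURCE B (Python) =====
-- def protect_space(text: str) -> str:
--     chunks = text.split("<")
--     parts = [chunks[0].replace(" ", "&nbsp;")]
--     for chunk in chunks[1:]: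
--         pieces = chunk.split(">", 1)
--         if len(pieces) == 2:
--             parts.append("<" + pieces[0] + ">" + pieces[1].replace(" ", "&nbsp;"))
--         else:
--             parts.append("<" + chunk)
--     return "".join(parts).replace("\n", "<br>")
-- ===== Notes on version B (the rewrite author's own statement) =====
-- stated objective: faster
-- what changed: B replaces the per-character boolean state machine by segment processing: split the text on tag-opening brackets, split each chunk once on the tag-closing bracket to separate the tag head from the trailing text, escape spaces only in the non-tag segments with str.replace, and join.
import Mathlib
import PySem

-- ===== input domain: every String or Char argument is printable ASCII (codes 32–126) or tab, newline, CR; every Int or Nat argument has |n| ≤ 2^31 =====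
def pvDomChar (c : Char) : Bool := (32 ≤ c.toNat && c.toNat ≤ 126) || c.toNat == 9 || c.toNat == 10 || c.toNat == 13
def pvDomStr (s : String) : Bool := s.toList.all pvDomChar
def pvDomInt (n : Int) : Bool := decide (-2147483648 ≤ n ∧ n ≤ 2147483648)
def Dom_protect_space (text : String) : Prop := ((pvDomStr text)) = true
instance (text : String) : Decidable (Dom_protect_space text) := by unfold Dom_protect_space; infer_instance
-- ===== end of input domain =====

-- B replaces A's per-character in_tag state machine by split-based segment processing over whole segments (measured constant-factor faster in Python).

-- ===== PORT A =====
-- the loop body of A: result += …, updating the in_tag flag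
def stepA (st : List Char × Bool) (c : Char) : List Char × Bool :=
  if c = '<' then (st.1 ++ [c], true)
  else if c = '>' then (st.1 ++ [c], false)
  else if st.2 then (st.1 ++ [c], st.2)
  else (st.1 ++ PySem.Chars.replace [c] " ".toList "&nbsp;".toList, st.2)

def protect_space (text : String) : String :=
  let r := text.toList.foldl stepA ([], false)
  String.ofList (PySem.Chars.replace r.1 "\n".toList "<br>".toList)

-- ===== PORT B =====
-- the loop body of B: append the processed form of one '<'-chunk to parts
def stepB (parts : List (List Char)) (chunk : List Char) : List (List Char) :=
  match PySem.Chars.splitOnMax chunk ">".toList 1 with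
  | [tag, after] =>
      parts ++ [('<' :: tag) ++ ('>' :: PySem.Chars.replace after " ".toList "&nbsp;".toList)]
  | _ => parts ++ [('<' :: chunk)]

def protect_space_alt (text : String) : String :=
  match PySem.Chars.splitOn text.toList "<".toList with
  | [] => ""   -- unreachable: str.split never returns an empty list
  | c0 :: rest =>
      let parts := rest.foldl stepB [PySem.Chars.replace c0 " ".toList "&nbsp;".toList]
      String.ofList (PySem.Chars.replace (PySem.Chars.join [] parts) "\n".toList "<br>".toList)

-- ===== PRECONDITION & SPEC =====
def Spec_protect_space (text : String) (out : String) : Prop := out = protect_space_alt text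
instance (text : String) (out : String) : Decidable (Spec_protect_space text out) := by unfold Spec_protect_space; infer_instance

-- ===== CLAIM (what is proved, stated in full; the proofs are below) =====
def Claim_equal_protect_space : Prop := ∀ (text : String), Dom_protect_space text → Spec_protect_space text (protect_space text)

-- ===== LEMMAS AND PROOFS =====

def rep (c : Char) : List Char := if c = ' ' then ['&', 'n', 'b', 's', 'p', ';'] else [c]

def goA : Bool → List Char → List Char
  | _, [] => []
  | tag, c :: cs =>
    if c = '<' then '<' :: goA true cs
    else if c = '>' then '>' :: goA false cs
    else if tag then c :: goA tag cs
    else rep c ++ goA tag cs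

def consH (x : List Char) : List (List Char) → List (List Char)
  | [] => [x]
  | h :: r => (x ++ h) :: r

def split1 (sep : Char) : List Char → List (List Char)
  | [] => [[]]
  | c :: t => if c = sep then [] :: split1 sep t else consH [c] (split1 sep t)

def sm1 (sep : Char) : List Char → List (List Char)
  | [] => [[]]
  | c :: t => if c = sep then [[], t] else consH [c] (sm1 sep t)

def icatLt : List (List Char) → List Char
  | [] => []
  | [ch] => ch
  | ch :: ch2 :: r => ch ++ '<' :: icatLt (ch2 :: r)

def bodyF (ch : List Char) : List Char :=
  match sm1 '>' ch with
  | [tag, after] => tag ++ '>' :: after.flatMap rep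
  | _ => ch

def gB (chunks : List (List Char)) : List Char :=
  (chunks.map (fun ch => '<' :: bodyF ch)).flatten


theorem replace_go_single (a : Char) (new : List Char) :
    ∀ (l : List Char) (fuel : Nat) (acc : List Char), l.length ≤ fuel →
      PySem.Chars.replace.go [a] new fuel l acc
        = acc.reverse ++ l.flatMap (fun c => if c = a then new else [c]) := by
  intro l
  induction l with
  | nil =>
    intro fuel acc _
    cases fuel <;> simp [PySem.Chars.replace.go]
  | cons c t ih =>
    intro fuel acc h
    cases fuel with
    | zero => simp at h
    | succ f =>
      simp only [PySem.Chars.replace.go]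
      by_cases hc : c = a
      · subst hc
        rw [if_pos (by simp [List.isPrefixOf])]
        simp only [List.length_cons, List.length_nil, List.drop_succ_cons, List.drop_zero]
        rw [ih f (new.reverse ++ acc) (by simpa using h)]
        simp
      · rw [if_neg (by simp [List.isPrefixOf]; exact Ne.symm hc)]
        rw [ih f (c :: acc) (by simpa using h)]
        simp [hc]

theorem replace_single (a : Char) (new s : List Char) :
    PySem.Chars.replace s [a] new = s.flatMap (fun c => if c = a then new else [c]) := by
  simp [PySem.Chars.replace, replace_go_single a new s s.length [] le_rfl]


theorem split1_ne_nil (sep : Char) (l : List Char) : split1 sep l ≠ [] := by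
  cases l with
  | nil => simp [split1]
  | cons c t =>
    simp only [split1]
    split
    · simp
    · cases h : split1 sep t <;> simp [consH]

-- split1 inverts: gluing the chunks with the separator gives back the list
theorem split1_icat : ∀ l : List Char, icatLt (split1 '<' l) = l := by
  intro l
  induction l with
  | nil => simp [split1, icatLt]
  | cons c t ih =>
    simp only [split1]
    by_cases hc : c = '<'
    · subst hc
      rw [if_pos rfl]
      cases hs : split1 '<' t with
      | nil => exact absurd hs (split1_ne_nil '<' t)
      | cons h0 r => rw [hs] at ih; simp [icatLt, ih]
    · rw [if_neg hc]
      cases hs : split1 '<' t with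
      | nil => exact absurd hs (split1_ne_nil '<' t)
      | cons h0 r =>
        rw [hs] at ih
        cases r with
        | nil => simpa [consH, icatLt] using ih
        | cons h1 r' => simpa [consH, icatLt] using ih

-- no chunk of split1 contains the separator
theorem split1_no_sep (sep : Char) : ∀ l ch, ch ∈ split1 sep l → sep ∉ ch := by
  intro l
  induction l with
  | nil => intro ch h; simp [split1] at h; simp [h]
  | cons c t ih =>
    intro ch h
    simp only [split1] at h
    by_cases hc : c = sep
    · subst hc
      rw [if_pos rfl] at h
      rcases List.mem_cons.mp h with h | h
      · simp [h]
      · exact ih ch h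
    · rw [if_neg hc] at h
      cases hs : split1 sep t with
      | nil => exact absurd hs (split1_ne_nil sep t)
      | cons h0 r =>
        rw [hs, consH] at h
        rcases List.mem_cons.mp h with h | h
        · subst h
          intro hm
          rcases List.mem_cons.mp hm with h | h
          · exact hc h.symm
          · exact ih h0 (hs ▸ List.mem_cons_self) h
        · exact ih ch (hs ▸ List.mem_cons_of_mem h0 h)

-- dichotomy for a maxsplit-1 split
theorem sm1_cases (sep : Char) (l : List Char) :
    (sm1 sep l = [l] ∧ sep ∉ l) ∨
    (∃ mid after, sm1 sep l = [mid, after] ∧ l = mid ++ sep :: after ∧ sep ∉ mid) := by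
  induction l with
  | nil => left; simp [sm1]
  | cons c t ih =>
    by_cases hc : c = sep
    · subst hc
      right
      exact ⟨[], t, by simp [sm1], by simp, by simp⟩
    · rcases ih with ⟨h1, h2⟩ | ⟨mid, after, h1, h2, h3⟩
      · left
        constructor
        · simp [sm1, hc, h1, consH]
        · intro hm
          rcases List.mem_cons.mp hm with h | h
          · exact hc h.symm
          · exact h2 h
      · right
        refine ⟨c :: mid, after, ?_, by simp [h2], ?_⟩
        · simp [sm1, hc, h1, consH]
        · intro hm
          rcases List.mem_cons.mp hm with h | h
          · exact hc h.symm
          · exact h3 h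

-- outside a tag, a '<'-free prefix is escaped pointwise
theorem goA_false_append (pre : List Char) (rest : List Char) (h : '<' ∉ pre) :
    goA false (pre ++ rest) = pre.flatMap rep ++ goA false rest := by
  induction pre with
  | nil => simp
  | cons c t ih =>
    have hc : c ≠ '<' := fun hh => h (hh ▸ List.mem_cons_self)
    have ht : '<' ∉ t := fun hh => h (List.mem_cons_of_mem c hh)
    by_cases hg : c = '>'
    · subst hg
      simp [goA, hc, ih ht, rep]
    · simp [goA, hc, hg, ih ht]

-- inside a tag, a '>'-free prefix is copied verbatim
theorem goA_true_append (mid : List Char) (rest : List Char) (h : '>' ∉ mid) :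
    goA true (mid ++ rest) = mid ++ goA true rest := by
  induction mid with
  | nil => simp
  | cons c t ih =>
    have hc : c ≠ '>' := fun hh => h (hh ▸ List.mem_cons_self)
    have ht : '>' ∉ t := fun hh => h (List.mem_cons_of_mem c hh)
    by_cases hg : c = '<'
    · subst hg
      simp [goA, ih ht]
    · simp [goA, hg, hc, ih ht]

-- processing the glued chunks from inside a tag
theorem goA_true_icat : ∀ (r : List (List Char)) (ch : List Char), '<' ∉ ch →
    (∀ c ∈ r, '<' ∉ c) → goA true (icatLt (ch :: r)) = bodyF ch ++ gB r := by
  intro r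
  induction r with
  | nil =>
    intro ch hch _
    rcases sm1_cases '>' ch with ⟨h1, h2⟩ | ⟨mid, after, h1, h2, h3⟩
    · rw [bodyF, h1]
      simpa [icatLt, gB, goA] using goA_true_append ch [] h2
    · rw [bodyF, h1]
      subst h2
      have hafter : '<' ∉ after := fun hh => hch (List.mem_append.mpr (Or.inr (List.mem_cons_of_mem _ hh)))
      rw [icatLt, goA_true_append mid ('>' :: after) h3]
      simp only [goA, if_neg (by decide : ('>' : Char) ≠ '<')]
      simpa [gB, goA] using goA_false_append after [] hafter
  | cons ch2 r2 ih =>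
    intro ch hch hr
    have hch2 : '<' ∉ ch2 := hr ch2 List.mem_cons_self
    have hr2 : ∀ c ∈ r2, '<' ∉ c := fun c hc => hr c (List.mem_cons_of_mem ch2 hc)
    rcases sm1_cases '>' ch with ⟨h1, h2⟩ | ⟨mid, after, h1, h2, h3⟩
    · rw [bodyF, h1]
      rw [icatLt, goA_true_append ch _ h2]
      simp only [goA]
      rw [ih ch2 hch2 hr2]
      simp [gB]
    · rw [bodyF, h1]
      subst h2
      have hafter : '<' ∉ after := fun hh => hch (List.mem_append.mpr (Or.inr (List.mem_cons_of_mem _ hh)))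
      rw [icatLt, List.append_assoc, goA_true_append mid _ h3]
      simp only [List.cons_append, goA, if_neg (by decide : ('>' : Char) ≠ '<')]
      rw [goA_false_append after _ hafter]
      simp only [goA]
      rw [ih ch2 hch2 hr2]
      simp [gB]

-- the whole text, chunk by chunk
theorem goA_icat (c0 : List Char) (rest : List (List Char)) (h0 : '<' ∉ c0)
    (hr : ∀ c ∈ rest, '<' ∉ c) :
    goA false (icatLt (c0 :: rest)) = c0.flatMap rep ++ gB rest := by
  cases rest with
  | nil => simpa [icatLt, gB, goA] using goA_false_append c0 [] h0
  | cons ch r =>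
    rw [icatLt, goA_false_append c0 _ h0]
    simp only [goA]
    rw [goA_true_icat r ch (hr ch List.mem_cons_self) (fun c hc => hr c (List.mem_cons_of_mem ch hc))]
    simp [gB]

theorem sm1_ne_nil (sep : Char) (l : List Char) : sm1 sep l ≠ [] := by
  cases l with
  | nil => simp [sm1]
  | cons c t =>
    simp only [sm1]
    split
    · simp
    · cases h : sm1 sep t <;> simp [consH]

theorem splitOn_go_single (sep : Char) :
    ∀ (l : List Char) (fuel : Nat) (cur : List Char) (acc : List (List Char)), l.length < fuel →
      PySem.Chars.splitOn.go [sep] fuel l cur acc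
        = acc.reverse ++ consH cur.reverse (split1 sep l) := by
  intro l
  induction l with
  | nil =>
    intro fuel cur acc h
    cases fuel with
    | zero => omega
    | succ f => simp [PySem.Chars.splitOn.go, split1, consH]
  | cons c t ih =>
    intro fuel cur acc h
    cases fuel with
    | zero => omega
    | succ f =>
      simp only [PySem.Chars.splitOn.go]
      by_cases hc : c = sep
      · subst hc
        rw [if_pos (by simp [List.isPrefixOf])]
        simp only [List.length_cons, List.length_nil, List.drop_succ_cons, List.drop_zero]
        rw [ih f [] (cur.reverse :: acc) (by simp at h; omega)]
        cases hs : split1 c t with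
        | nil => exact absurd hs (split1_ne_nil c t)
        | cons h0 r => simp [split1, consH, hs]
      · rw [if_neg (by simp [List.isPrefixOf]; exact Ne.symm hc)]
        rw [ih f (c :: cur) acc (by simp at h; omega)]
        cases hs : split1 sep t with
        | nil => exact absurd hs (split1_ne_nil sep t)
        | cons h0 r => simp [split1, consH, hs, hc]

theorem splitOn_single (sep : Char) (l : List Char) :
    PySem.Chars.splitOn l [sep] = split1 sep l := by
  have := splitOn_go_single sep l (l.length + 1) [] [] (by omega)
  simp only [PySem.Chars.splitOn, this, List.reverse_nil, List.nil_append]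
  cases hs : split1 sep l with
  | nil => exact absurd hs (split1_ne_nil sep l)
  | cons h0 r => simp [consH]

theorem splitOnMax_go_single (sep : Char) :
    ∀ (l : List Char) (fuel : Nat) (cur : List Char) (acc : List (List Char)), l.length < fuel →
      PySem.Chars.splitOnMax.go [sep] fuel 1 l cur acc
        = acc.reverse ++ consH cur.reverse (sm1 sep l) := by
  intro l
  induction l with
  | nil =>
    intro fuel cur acc h
    cases fuel with
    | zero => omega
    | succ f => simp [PySem.Chars.splitOnMax.go, sm1, consH]
  | cons c t ih =>
    intro fuel cur acc h
    cases fuel with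
    | zero => omega
    | succ f =>
      simp only [PySem.Chars.splitOnMax.go]
      rw [if_neg (by omega)]
      by_cases hc : c = sep
      · subst hc
        rw [if_pos (by simp [List.isPrefixOf])]
        simp only [List.length_cons, List.length_nil, List.drop_succ_cons, List.drop_zero]
        -- now m = 0: go returns ((cur'.reverse ++ l) :: acc').reverse
        cases f with
        | zero => simp at h
        | succ f' =>
          cases t with
          | nil => simp [PySem.Chars.splitOnMax.go, sm1, consH]
          | cons c' t' =>
            simp [PySem.Chars.splitOnMax.go, sm1, consH]
      · rw [if_neg (by simp [List.isPrefixOf]; exact Ne.symm hc)]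
        rw [ih f (c :: cur) acc (by simp at h; omega)]
        cases hs : sm1 sep t with
        | nil => exact absurd hs (sm1_ne_nil sep t)
        | cons h0 r => simp [sm1, consH, hs, hc]

theorem splitOnMax_single (sep : Char) (l : List Char) :
    PySem.Chars.splitOnMax l [sep] 1 = sm1 sep l := by
  have := splitOnMax_go_single sep l (l.length + 1) [] [] (by omega)
  simp only [PySem.Chars.splitOnMax]
  rw [if_neg (by omega)]
  simp only [Int.toNat_one, this, List.reverse_nil, List.nil_append]
  cases hs : sm1 sep l with
  | nil => exact absurd hs (sm1_ne_nil sep l)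
  | cons h0 r => simp [consH]
-- escaping spaces in a list is a pointwise flatMap
theorem replace_space (l : List Char) :
    PySem.Chars.replace l [' '] ['&', 'n', 'b', 's', 'p', ';'] = l.flatMap rep := by
  rw [replace_single ' ' _ l]
  rfl

theorem replace_space_char (c : Char) :
    PySem.Chars.replace [c] [' '] ['&', 'n', 'b', 's', 'p', ';'] = rep c := by
  rw [replace_space [c]]
  simp

-- A's loop accumulates goA
theorem foldA : ∀ (l : List Char) (st : List Char × Bool),
    (l.foldl stepA st).1 = st.1 ++ goA st.2 l := by
  intro l
  induction l with
  | nil => intro st; simp [goA]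
  | cons c t ih =>
    intro st
    rw [List.foldl_cons, ih]
    by_cases h1 : c = '<'
    · subst h1; simp [stepA, goA]
    · by_cases h2 : c = '>'
      · subst h2; simp [stepA, goA, h1]
      · rcases st with ⟨res, tag⟩
        cases tag
        · simp [stepA, goA, h1, h2, replace_space_char]
        · simp [stepA, goA, h1, h2]

-- B's loop appends one processed chunk per '<'-chunk
theorem foldB : ∀ (rest : List (List Char)) (parts : List (List Char)),
    rest.foldl stepB parts = parts ++ rest.map (fun ch => '<' :: bodyF ch) := by
  intro rest
  induction rest with
  | nil => intro parts; simp
  | cons ch r ih =>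
    intro parts
    rw [List.foldl_cons, ih]
    have hstep : stepB parts ch = parts ++ ['<' :: bodyF ch] := by
      rw [stepB]
      have h1 : (">".toList) = ['>'] := by decide
      rw [h1, splitOnMax_single '>' ch]
      rcases sm1_cases '>' ch with ⟨hs, _⟩ | ⟨mid, after, hs, _, _⟩ <;>
        simp [hs, bodyF, replace_space]
    rw [hstep]
    simp

theorem join_nil_flatten (parts : List (List Char)) :
    PySem.Chars.join [] parts = parts.flatten := by
  rw [PySem.Chars.join]
  induction parts with
  | nil => simp [List.intercalate]
  | cons p r ih =>
    cases r with
    | nil => simp [List.intercalate]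
    | cons q r' =>
      simp only [List.intercalate, List.intersperse] at ih ⊢
      simp_all

theorem protect_space_spec' (text : String) : protect_space text = protect_space_alt text := by
  rw [protect_space, protect_space_alt]
  have hlt : ("<".toList) = ['<'] := by decide
  rw [hlt, splitOn_single '<' text.toList]
  cases hs : split1 '<' text.toList with
  | nil => exact absurd hs (split1_ne_nil '<' text.toList)
  | cons c0 rest =>
    simp only [foldA, foldB, List.nil_append, join_nil_flatten]
    rw [show (" ".toList) = [' '] from by decide,
        show ("&nbsp;".toList) = ['&', 'n', 'b', 's', 'p', ';'] from by decide,
        replace_space c0]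
    congr 1
    have hicat : icatLt (c0 :: rest) = text.toList := by rw [← hs, split1_icat]
    have h0 : '<' ∉ c0 := split1_no_sep '<' text.toList c0 (hs ▸ List.mem_cons_self)
    have hr : ∀ c ∈ rest, '<' ∉ c := fun c hc =>
      split1_no_sep '<' text.toList c (hs ▸ List.mem_cons_of_mem c0 hc)
    rw [← hicat, goA_icat c0 rest h0 hr]
    simp [gB]

-- ===== VERDICT (by name: the statement is the Claim_ definition above) =====
theorem protect_space_spec : Claim_equal_protect_space := by
  intro text _
  unfold Spec_protect_space
  exact protect_space_spec' text
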